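-- pv_equiv track=rewrite | github.com/clauzond/maze | maze2.py | portions_effe
-- ===== SOURCE A (Python) =====
-- def portions_effe(Liste_Coords,Liste_F):
--     Liste_de_listes = []
--     Liste_first_indice = []
--     i=0
--     while i!=(len(Liste_F)-1):
--         first_indice=i
--         while Liste_F[i+1]>Liste_F[i] :
--             i+=1
--         # Si l'indice n'a pas changé, pas de changements
--         if first_indice==i :
--             Liste_first_indice.append( first_indice )
--         else:
--             L= Liste_first_indice + [k for k in range(first_indice,i + 1)]
--             Liste_de_listes.append( L )
--             Liste_first_indice=[]
--         i+=1
--     Liste_de_listes.append(Liste_first_indice)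
--
--     final=[]
--     for liste in Liste_de_listes :
--         final.append( [ Liste_Coords[liste[0]],Liste_Coords[liste[-1]]] )
--
--     return(final)
-- ===== SOURCE B (Python) =====
-- def portions_effe(Liste_Coords, Liste_F):
--     n = len(Liste_F)
--     # a group of indices ends exactly at a "local peak" e: the step into e rises
--     # and the step out of e does not; no scan state is needed at all
--     peaks = [e for e in range(1, n - 1)
--              if Liste_F[e - 1] < Liste_F[e] and Liste_F[e + 1] <= Liste_F[e]]
--     bounds = [0] + [e + 1 for e in peaks] + [n - 1]
--     groups = [list(range(a, b)) for a, b in zip(bounds, bounds[1:])]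
--     return [[Liste_Coords[g[0]], Liste_Coords[g[-1]]] for g in groups]
-- ===== Notes on version B (the rewrite author's own statement) =====
-- stated objective: alternative
-- what changed: A's stateful sweep with a nested inner while and two accumulators is replaced by a stateless pointwise characterization: a group boundary is exactly a local peak (F[e-1]<F[e] and F[e+1]<=F[e]), so B filters peak positions with one comprehension, slices the index range at those boundaries, and maps each slice to its endpoint coordinates.
import Mathlib
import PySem

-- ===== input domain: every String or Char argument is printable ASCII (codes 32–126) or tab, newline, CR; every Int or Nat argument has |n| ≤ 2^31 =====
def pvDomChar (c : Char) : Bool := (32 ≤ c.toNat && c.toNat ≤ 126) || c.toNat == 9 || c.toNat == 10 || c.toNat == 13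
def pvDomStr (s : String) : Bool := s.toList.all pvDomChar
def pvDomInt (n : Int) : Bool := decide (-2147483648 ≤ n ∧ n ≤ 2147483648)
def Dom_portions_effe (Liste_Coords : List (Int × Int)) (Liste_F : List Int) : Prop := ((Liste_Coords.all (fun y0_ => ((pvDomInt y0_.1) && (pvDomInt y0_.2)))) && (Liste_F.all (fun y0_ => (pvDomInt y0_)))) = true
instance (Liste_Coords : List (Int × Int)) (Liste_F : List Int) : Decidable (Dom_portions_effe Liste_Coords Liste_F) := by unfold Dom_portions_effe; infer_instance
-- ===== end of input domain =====

-- B replaces A's stateful nested-while sweep by a stateless pointwise peak filter plus a zip;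
-- equal output on Pre_ (exactly where Python A returns).

-- ===== PORT A =====
-- inner while: advance i while Liste_F[i+1] > Liste_F[i]; fuel makes it total (ample inside Pre_)
def pvInner (F : List Int) : Nat → Nat → Nat
  | 0, i => i
  | fuel+1, i => if F.getD (i+1) 0 > F.getD i 0 then pvInner F fuel (i+1) else i

-- outer while over i with the two accumulators Liste_de_listes / Liste_first_indice
def pvOuter (F : List Int) (n : Nat) : Nat → Nat → List (List Nat) → List Nat → List (List Nat)
  | 0, _, LL, Lfi => LL ++ [Lfi]
  | fuel+1, i, LL, Lfi =>
      if i = n - 1 then LL ++ [Lfi]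
      else
        let e := pvInner F fuel i
        if i = e then pvOuter F n fuel (e+1) LL (Lfi ++ [i])
        else pvOuter F n fuel (e+1) (LL ++ [Lfi ++ List.range' i (e + 1 - i)]) []

def portions_effe (Liste_Coords : List (Int × Int)) (Liste_F : List Int) : List (List (Int × Int)) :=
  let n := Liste_F.length
  let LL := pvOuter Liste_F n n 0 [] []
  -- final for-loop: [Liste_Coords[liste[0]], Liste_Coords[liste[-1]]] (total lookups; groups nonempty inside Pre_)
  LL.map (fun g => [Liste_Coords.getD (g.headD 0) (0,0), Liste_Coords.getD (g.getLastD 0) (0,0)])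

-- ===== PORT B =====
-- Source B's peak condition: the step into e rises, the step out of e does not
def pvPeak (F : List Int) (e : Nat) : Bool :=
  decide (F.getD (e-1) 0 < F.getD e 0) && decide (F.getD (e+1) 0 ≤ F.getD e 0)

def portions_effe_alt (Liste_Coords : List (Int × Int)) (Liste_F : List Int) : List (List (Int × Int)) :=
  let n := Liste_F.length
  let peaks := (List.range' 1 (n - 1 - 1)).filter (pvPeak Liste_F)
  let bounds := 0 :: (peaks.map (· + 1) ++ [n - 1])
  let groups := (bounds.zip bounds.tail).map (fun p => List.range' p.1 (p.2 - p.1))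
  -- final comprehension: [Liste_Coords[g[0]], Liste_Coords[g[-1]]] (total lookups; groups nonempty inside Pre_)
  groups.map (fun g => [Liste_Coords.getD (g.headD 0) (0,0), Liste_Coords.getD (g.getLastD 0) (0,0)])

-- ===== PRECONDITION & SPEC =====
-- Pre_ excludes exactly the inputs where Python A raises (IndexError): fewer than 2 marks, too few coords,
-- an increasing final step (the inner while runs off the end), or a rise into index n-2 (empty trailing group).
def Pre_portions_effe (Liste_Coords : List (Int × Int)) (Liste_F : List Int) : Prop :=
  2 ≤ Liste_F.length ∧
  Liste_F.length - 1 ≤ Liste_Coords.length ∧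
  Liste_F.getD (Liste_F.length - 1) 0 ≤ Liste_F.getD (Liste_F.length - 2) 0 ∧
  (Liste_F.length = 2 ∨ Liste_F.getD (Liste_F.length - 2) 0 ≤ Liste_F.getD (Liste_F.length - 3) 0)
instance (Liste_Coords : List (Int × Int)) (Liste_F : List Int) : Decidable (Pre_portions_effe Liste_Coords Liste_F) := by unfold Pre_portions_effe; infer_instance

def pvWitness_portions_effe : (List (Int × Int)) × List Int := ([(0,0),(1,1),(2,2)], [1,2,0,0])

def Spec_portions_effe (Liste_Coords : List (Int × Int)) (Liste_F : List Int) (out : List (List (Int × Int))) : Prop := out = portions_effe_alt Liste_Coords Liste_F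
instance (Liste_Coords : List (Int × Int)) (Liste_F : List Int) (out : List (List (Int × Int))) : Decidable (Spec_portions_effe Liste_Coords Liste_F out) := by unfold Spec_portions_effe; infer_instance

-- ===== CLAIM (what is proved, stated in full; the proofs are below) =====
def Claim_equal_portions_effe : Prop := ∀ (Liste_Coords : List (Int × Int)) (Liste_F : List Int), Dom_portions_effe Liste_Coords Liste_F → Pre_portions_effe Liste_Coords Liste_F → Spec_portions_effe Liste_Coords Liste_F (portions_effe Liste_Coords Liste_F)

-- ===== LEMMAS AND PROOFS =====

-- B's zip-of-starts-and-ends output, written as a recursion on the peak list (proved equal to B's zip below)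
def pvZipOut (C : List (Int × Int)) (n : Nat) : Nat → List Nat → List (List (Int × Int))
  | s, [] => [[C.getD s (0,0), C.getD (n-2) (0,0)]]
  | s, e :: ps => [C.getD s (0,0), C.getD e (0,0)] :: pvZipOut C n (e+1) ps

-- head/last of a nonempty range'
theorem pvRange'_headD (s m : Nat) (h : 0 < m) : (List.range' s m).headD 0 = s := by
  obtain ⟨m', rfl⟩ : ∃ m', m = m' + 1 := ⟨m - 1, by omega⟩
  simp [List.range'_succ]

theorem pvRange'_getLastD (s m : Nat) (h : 0 < m) : (List.range' s m).getLastD 0 = s + m - 1 := by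
  obtain ⟨m', rfl⟩ : ∃ m', m = m' + 1 := ⟨m - 1, by omega⟩
  rw [List.range'_concat]
  simp

-- B's bounds-zip groups, mapped to endpoints, equal pvZipOut on an increasing in-range peak list
theorem pvGroups_eq (C : List (Int × Int)) (n : Nat) (hn : 2 ≤ n) : ∀ (ps : List Nat) (s : Nat),
    List.Pairwise (· < ·) ps → (∀ x ∈ ps, s ≤ x) → (∀ x ∈ ps, x + 3 ≤ n) → s ≤ n - 2 →
    ((((s :: (ps.map (· + 1) ++ [n - 1])).zip (s :: (ps.map (· + 1) ++ [n - 1])).tail).map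
        (fun p => List.range' p.1 (p.2 - p.1))).map
      (fun g => [C.getD (g.headD 0) (0,0), C.getD (g.getLastD 0) (0,0)])) = pvZipOut C n s ps := by
  intro ps
  induction ps with
  | nil =>
      intro s _ _ _ hs
      simp only [List.map_nil, List.nil_append, List.tail_cons, List.zip_cons_cons,
        List.zip_nil_right, List.map_cons, List.map_nil, pvZipOut]
      rw [pvRange'_headD s (n-1-s) (by omega), pvRange'_getLastD s (n-1-s) (by omega)]
      have : s + (n - 1 - s) - 1 = n - 2 := by omega
      rw [this]
  | cons e ps ih =>
      intro s hp hs hb hsn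
      have hse : s ≤ e := hs e (List.mem_cons_self)
      have hen : e + 3 ≤ n := hb e (List.mem_cons_self)
      simp only [List.map_cons, List.cons_append, List.tail_cons, List.zip_cons_cons, pvZipOut]
      rw [pvRange'_headD s (e+1-s) (by omega), pvRange'_getLastD s (e+1-s) (by omega)]
      have h1 : s + (e + 1 - s) - 1 = e := by omega
      rw [h1]
      congr 1
      have := ih (e+1) (List.Pairwise.of_cons hp)
        (fun x hx => (List.pairwise_cons.mp hp).1 x hx)
        (fun x hx => hb x (List.mem_cons_of_mem e hx)) (show e + 1 ≤ n - 2 by omega)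
      simpa using this

-- the inner while stops exactly at the first e ≥ i where F[e+1] ≤ F[e], given enough fuel
theorem pvInner_char (F : List Int) : ∀ (f i e : Nat), i ≤ e →
    (∀ k, i ≤ k → k < e → F.getD (k+1) 0 > F.getD k 0) →
    ¬ (F.getD (e+1) 0 > F.getD e 0) → e - i ≤ f → pvInner F f i = e := by
  intro f
  induction f with
  | zero =>
      intro i e hie _ _ hf
      have : e = i := by omega
      simp [pvInner, this]
  | succ f ih =>
      intro i e hie hcont hstop hf
      by_cases h : F.getD (i+1) 0 > F.getD i 0
      · have hne : i ≠ e := by intro he; exact hstop (he ▸ h)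
        have hlt : i < e := lt_of_le_of_ne hie hne
        simp only [pvInner, if_pos h]
        exact ih (i+1) e hlt (fun k hk1 hk2 => hcont k (by omega) hk2) hstop (by omega)
      · have hieq : i = e := by
          by_contra hne
          exact h (hcont i le_rfl (by omega))
        subst hieq
        simp only [pvInner]
        rw [if_neg h]

-- the outer while returns immediately at i = n-1 whatever the fuel
theorem pvOuter_stop (F : List Int) (n : Nat) (f : Nat) (LL : List (List Nat)) (Lfi : List Nat) :
    pvOuter F n f (n-1) LL Lfi = LL ++ [Lfi] := by
  cases f <;> simp [pvOuter]

-- peak filter over a split range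
theorem pvFilter_split (F : List Int) (i m k : Nat) :
    (List.range' i (m + k)).filter (pvPeak F)
      = (List.range' i m).filter (pvPeak F) ++ (List.range' (i+m) k).filter (pvPeak F) := by
  rw [← List.range'_append_1, List.filter_append]

-- main correspondence: A's outer loop, with its accumulator being the contiguous block
-- range' s (i-s), maps to B's peak zip from block start s
theorem pvMain (C : List (Int × Int)) (F : List Int) (n : Nat) (hn : 2 ≤ n) (hnF : n = F.length)
    (hlast : ¬ (F.getD (n-1) 0 > F.getD (n-2) 0))
    (hpen : n = 2 ∨ F.getD (n-2) 0 ≤ F.getD (n-3) 0) :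
    ∀ (d fuel i s : Nat) (LL : List (List Nat)), n - 1 - i = d → n - 1 - i ≤ fuel →
    i < n - 1 → s ≤ i →
    (i = 0 ∨ F.getD i 0 ≤ F.getD (i-1) 0) →
    (pvOuter F n fuel i LL (List.range' s (i - s))).map
        (fun g => [C.getD (g.headD 0) (0,0), C.getD (g.getLastD 0) (0,0)])
      = LL.map (fun g => [C.getD (g.headD 0) (0,0), C.getD (g.getLastD 0) (0,0)])
          ++ pvZipOut C n s ((List.range' i (n - 1 - i)).filter (pvPeak F)) := by
  intro d
  induction d using Nat.strong_induction_on with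
  | _ d ih =>
      intro fuel i s LL hd hfuel hi hs hstart
      obtain ⟨f, rfl⟩ : ∃ f, fuel = f + 1 := ⟨fuel - 1, by omega⟩
      -- the end e of the run starting at i
      have hPex : ∃ k, ¬ (F.getD (i + k + 1) 0 > F.getD (i + k) 0) := by
        refine ⟨n - 2 - i, ?_⟩
        have h1 : i + (n - 2 - i) = n - 2 := by omega
        have h2 : n - 2 + 1 = n - 1 := by omega
        rw [h1, h2]; exact hlast
      classical
      set k0 := Nat.find hPex with hk0
      set e := i + k0 with he
      have hstop : ¬ (F.getD (e+1) 0 > F.getD e 0) := Nat.find_spec hPex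
      have hcont : ∀ k, i ≤ k → k < e → F.getD (k+1) 0 > F.getD k 0 := by
        intro k hk1 hk2
        have := Nat.find_min hPex (m := k - i) (by omega)
        have hki : i + (k - i) = k := by omega
        rw [hki] at this
        exact not_not.mp this
      have hele : e ≤ n - 2 := by
        have := Nat.find_min' hPex (m := n - 2 - i) (by
          have h1 : i + (n - 2 - i) = n - 2 := by omega
          have h2 : n - 2 + 1 = n - 1 := by omega
          rw [h1, h2]; exact hlast)
        omega
      have hinner : pvInner F f i = e := pvInner_char F f i e (by omega) hcont hstop (by omega)
      -- i itself is never a peak (block starts are preceded by a non-rise)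
      have hipeak : pvPeak F i = false := by
        unfold pvPeak
        rcases hstart with h0 | hle
        · subst h0; simp
        · simp only [Bool.and_eq_false_iff, decide_eq_false_iff_not, not_lt]
          left; exact hle
      simp only [pvOuter, if_neg (Nat.ne_of_lt hi), hinner]
      by_cases hie : i = e
      · -- singleton run: no peak at i, block grows
        have hnpk : (List.range' i (n - 1 - i)).filter (pvPeak F)
            = (List.range' (i+1) (n - 1 - (i+1))).filter (pvPeak F) := by
          have hsplit : n - 1 - i = 1 + (n - 1 - (i+1)) := by omega
          rw [hsplit, pvFilter_split]
          simp [hipeak]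
        have hext : List.range' s (i - s) ++ [i] = List.range' s (i + 1 - s) := by
          have h1 : i + 1 - s = (i - s) + 1 := by omega
          have h2 : s + (i - s) = i := by omega
          rw [h1, List.range'_concat, one_mul, h2]
        simp only [← hie, hext, hnpk]
        rw [if_pos trivial]
        by_cases hend : i + 1 = n - 1
        · rw [hend, pvOuter_stop]
          have hnn : n - 1 - (n - 1) = 0 := by omega
          rw [hnn]
          simp only [List.range'_zero, List.filter_nil, List.map_append, List.map_cons, List.map_nil]
          rw [pvRange'_headD s (n-1-s) (by omega), pvRange'_getLastD s (n-1-s) (by omega)]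
          have : s + (n - 1 - s) - 1 = n - 2 := by omega
          rw [this]
          simp [pvZipOut]
        · refine ih (n - 1 - (i+1)) (by omega) f (i+1) s LL rfl (by omega) (by omega) (by omega)
            (Or.inr ?_)
          simp only [Nat.add_sub_cancel]
          rw [hie]
          exact not_lt.mp hstop
      · -- multi run: e is a peak, flush the block [s..e]
        have hilt : i < e := lt_of_le_of_ne (by omega) hie
        -- under Pre_ a multi run cannot end at n-2 (that empty trailing group raises in A)
        have hene : e < n - 2 := by
          rcases Nat.lt_or_ge e (n - 2) with h | h
          · exact h
          · exfalso
            have heq : e = n - 2 := by omega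
            have hrise : F.getD e 0 > F.getD (e-1) 0 := by
              have := hcont (e-1) (by omega) (by omega)
              have h1 : e - 1 + 1 = e := by omega
              rwa [h1] at this
            rcases hpen with h2 | hle
            · omega
            · rw [heq] at hrise
              have : n - 2 - 1 = n - 3 := by omega
              rw [this] at hrise
              omega
        have hepeak : pvPeak F e = true := by
          unfold pvPeak
          have hrise : F.getD e 0 > F.getD (e-1) 0 := by
            have := hcont (e-1) (by omega) (by omega)
            have h1 : e - 1 + 1 = e := by omega
            rwa [h1] at this
          simp only [Bool.and_eq_true, decide_eq_true_eq]
          exact ⟨hrise, not_lt.mp hstop⟩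
        -- split the peak filter: [i..e] contributes exactly [e]
        have hsplit1 : (List.range' i (n - 1 - i)).filter (pvPeak F)
            = e :: (List.range' (e+1) (n - 1 - (e+1))).filter (pvPeak F) := by
          have hlen : n - 1 - i = (e + 1 - i) + (n - 1 - (e+1)) := by omega
          rw [hlen, pvFilter_split]
          have h2 : i + (e + 1 - i) = e + 1 := by omega
          rw [h2]
          -- filter over [i..e] = [e]
          have hmid : ∀ m, m ≤ e - i + 1 → (List.range' (e + 1 - m) m).filter (pvPeak F)
              = if m = 0 then [] else [e] := by
            intro m
            induction m with
            | zero => intro _; simp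
            | succ m ihm =>
                intro hm
                have h3 : e + 1 - (m+1) = e - m := by omega
                rw [h3, List.range'_succ]
                by_cases hm0 : m = 0
                · subst hm0
                  simp [hepeak, show e - 0 = e from rfl]
                · have hmpk : pvPeak F (e - m) = false := by
                    unfold pvPeak
                    have := hcont (e - m) (by omega) (by omega)
                    simp only [Bool.and_eq_false_iff, decide_eq_false_iff_not, not_le]
                    right
                    have h4 : e - m + 1 = e - m + 1 := rfl
                    exact this
                  rw [List.filter_cons_of_neg (by simp [hmpk])]
                  have h5 : e + 1 - m = e - m + 1 := by omega
                  rw [← h5, ihm (by omega), if_neg hm0]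
                  simp [hm0]
          have := hmid (e + 1 - i) (by omega)
          have h6 : e + 1 - (e + 1 - i) = i := by omega
          rw [h6] at this
          rw [this, if_neg (by omega), List.singleton_append]
        rw [hsplit1]
        simp only [if_neg hie]
        have hgrp : List.range' s (i - s) ++ List.range' i (e + 1 - i) = List.range' s (e + 1 - s) := by
          have h7 : s + (i - s) = i := by omega
          have h8 : i - s + (e + 1 - i) = e + 1 - s := by omega
          have h9 := @List.range'_append_1 s (i - s) (e + 1 - i)
          rw [h7, h8] at h9
          exact h9
        rw [hgrp]
        have hrec := ih (n - 1 - (e+1)) (by omega) f (e+1) (e+1)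
          (LL ++ [List.range' s (e + 1 - s)]) rfl (by omega) (by omega) le_rfl
          (Or.inr (by simpa using not_lt.mp hstop))
        have h9 : e + 1 - (e + 1) = 0 := by omega
        rw [h9] at hrec
        simp only [List.range'_zero] at hrec
        rw [hrec]
        simp only [List.map_append, List.map_cons, List.map_nil, List.append_assoc]
        congr 1
        rw [pvRange'_headD s (e+1-s) (by omega), pvRange'_getLastD s (e+1-s) (by omega)]
        have h10 : s + (e + 1 - s) - 1 = e := by omega
        rw [h10]
        simp [pvZipOut]

-- ===== VERDICT (by name: the statement is the Claim_ definition above) =====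
theorem portions_effe_spec : Claim_equal_portions_effe := by
  intro C F _hdom hpre
  obtain ⟨hn, _hc, hlast, hpen⟩ := hpre
  unfold Spec_portions_effe
  simp only [portions_effe, portions_effe_alt]
  rw [pvGroups_eq C F.length hn _ 0 ?pw ?lo ?hi (by omega)]
  case pw => exact (List.pairwise_lt_range' (s := 1) (n := F.length - 1 - 1) 1).sublist (List.filter_sublist)
  case lo => intro x _; exact Nat.zero_le x
  case hi =>
      intro x hx
      obtain ⟨hxr, hxp⟩ := List.mem_filter.mp hx
      obtain ⟨hx1, hx2⟩ := List.mem_range'_1.mp hxr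
      rcases Nat.lt_or_ge x (F.length - 2) with h | h
      · omega
      · exfalso
        have hxeq : x = F.length - 2 := by omega
        rcases hpen with h2 | hle
        · omega
        · unfold pvPeak at hxp
          simp only [Bool.and_eq_true, decide_eq_true_eq] at hxp
          rw [hxeq] at hxp
          have h3 : F.length - 2 - 1 = F.length - 3 := by omega
          rw [h3] at hxp
          omega
  have := pvMain C F F.length hn rfl (not_lt_of_ge hlast) hpen (F.length - 1) F.length 0 0 []
    rfl (by omega) (by omega) le_rfl (Or.inl rfl)
  simp only [Nat.sub_zero, List.range'_zero, List.map_nil, List.nil_append] at this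
  rw [this]
  congr 1
  -- peaks over [0, n-1) vs Source B's range(1, n-1): index 0 is never a peak
  have hsplit : F.length - 1 = 1 + (F.length - 1 - 1) := by omega
  rw [hsplit, pvFilter_split]
  have h0pk : pvPeak F 0 = false := by unfold pvPeak; simp
  simp [h0pk]
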